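-- pv_equiv track=rewrite | github.com/v24s/wom-new-openings | wom_new_openings.py | prh_pick_language
-- ===== SOURCE A (Python) =====
-- from typing import Dict, Iterable, List, Optional
--
-- def prh_pick_language(items: List[Dict], key: str) -> Optional[str]:
--     if not items:
--         return None
--     for lang in ("en", "fi", "sv"):
--         for item in items:
--             if item.get("language") == lang and item.get(key):
--                 return item.get(key)
--     for item in items:
--         if item.get(key):
--             return item.get(key)
--     return None
-- ===== SOURCE B (Python) =====
-- def prh_pick_language(items, key):
--     en = fi = sv = anyv = None
--     for item in items:
--         v = item.get(key)
--         if not v: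
--             continue
--         lang = item.get("language")
--         if lang == "en":
--             if en is None:
--                 en = v
--         elif lang == "fi":
--             if fi is None:
--                 fi = v
--         elif lang == "sv":
--             if sv is None:
--                 sv = v
--         if anyv is None:
--             anyv = v
--     return en or fi or sv or anyv
-- ===== Notes on version B (the rewrite author's own statement) =====
-- stated objective: alternative
-- what changed: Replaces A's four separate scans (one per priority language plus a catch-all) by a single pass that records the first truthy value seen per language and overall, then resolves the priority by an or-chain.
import Mathlib
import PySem

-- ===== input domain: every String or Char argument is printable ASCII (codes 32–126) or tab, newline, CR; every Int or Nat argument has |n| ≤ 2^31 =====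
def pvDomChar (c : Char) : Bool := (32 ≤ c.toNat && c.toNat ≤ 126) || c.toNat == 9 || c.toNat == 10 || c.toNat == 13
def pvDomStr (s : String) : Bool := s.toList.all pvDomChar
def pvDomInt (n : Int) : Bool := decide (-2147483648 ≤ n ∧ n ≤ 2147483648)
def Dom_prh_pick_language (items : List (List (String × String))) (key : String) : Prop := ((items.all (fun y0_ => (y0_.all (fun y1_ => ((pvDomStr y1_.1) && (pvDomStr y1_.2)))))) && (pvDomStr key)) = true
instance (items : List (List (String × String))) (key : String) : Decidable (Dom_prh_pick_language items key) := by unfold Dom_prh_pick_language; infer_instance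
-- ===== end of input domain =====

-- B replaces A's four separate scans over items by a single pass recording first truthy
-- values per language, resolved afterwards by an or-chain (objective: alternative).

-- ===== PORT A =====
-- dict.get on an association list: first match, none if absent (exact for Python dict.get)
def pvGet (item : List (String × String)) (k : String) : Option String :=
  match item with
  | [] => none
  | (k', v) :: rest => if k' = k then some v else pvGet rest k

-- truthiness of item.get(key): None and "" are falsy
def pvTruthy (o : Option String) : Bool :=
  match o with
  | none => false
  | some v => decide (v ≠ "")

-- inner 'for item in items' of A for a fixed lang
def pvFindLang (items : List (List (String × String))) (key lang : String) : Option String :=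
  match items with
  | [] => none
  | item :: rest =>
      if pvGet item "language" = some lang ∧ pvTruthy (pvGet item key) = true then
        pvGet item key
      else pvFindLang rest key lang

-- A's final catch-all loop
def pvFindAny (items : List (List (String × String))) (key : String) : Option String :=
  match items with
  | [] => none
  | item :: rest =>
      if pvTruthy (pvGet item key) = true then pvGet item key
      else pvFindAny rest key

def prh_pick_language (items : List (List (String × String))) (key : String) : Option String :=
  if items = [] then none
  else
    match pvFindLang items key "en" with
    | some v => some v
    | none =>
      match pvFindLang items key "fi" with
      | some v => some v
      | none =>
        match pvFindLang items key "sv" with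
        | some v => some v
        | none => pvFindAny items key

-- ===== PORT B =====
-- state (en, fi, sv, anyv); one loop step of Source B
def pvStep (key : String)
    (st : Option String × Option String × Option String × Option String)
    (item : List (String × String)) :
    Option String × Option String × Option String × Option String :=
  match pvGet item key with
  | none => st
  | some v =>
    if v = "" then st
    else
      let lang := pvGet item "language"
      let en := if lang = some "en" ∧ st.1 = none then some v else st.1
      let fi := if ¬ lang = some "en" ∧ lang = some "fi" ∧ st.2.1 = none then some v else st.2.1
      let sv := if ¬ lang = some "en" ∧ ¬ lang = some "fi" ∧ lang = some "sv" ∧ st.2.2.1 = none then some v else st.2.2.1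
      let anyv := if st.2.2.2 = none then some v else st.2.2.2
      (en, fi, sv, anyv)

def prh_pick_language_alt (items : List (List (String × String))) (key : String) : Option String :=
  let r := items.foldl (pvStep key) (none, none, none, none)
  -- 'en or fi or sv or anyv': all stored values are truthy, so 'or' = first non-None
  (r.1.or (r.2.1.or (r.2.2.1.or r.2.2.2)))

-- ===== PRECONDITION & SPEC =====
def Spec_prh_pick_language (items : List (List (String × String))) (key : String) (out : Option String) : Prop := out = prh_pick_language_alt items key
instance (items : List (List (String × String))) (key : String) (out : Option String) : Decidable (Spec_prh_pick_language items key out) := by unfold Spec_prh_pick_language; infer_instance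

-- ===== CLAIM (what is proved, stated in full; the proofs are below) =====
def Claim_equal_prh_pick_language : Prop := ∀ (items : List (List (String × String))) (key : String), Dom_prh_pick_language items key → Spec_prh_pick_language items key (prh_pick_language items key)

-- ===== LEMMAS AND PROOFS =====

-- loop invariant: the fold computes, per component, 'first value already held, else first match in the rest'
theorem pvFoldl_step (key : String) (items : List (List (String × String)))
    (st : Option String × Option String × Option String × Option String) :
    items.foldl (pvStep key) st =
      (st.1.or (pvFindLang items key "en"),
       st.2.1.or (pvFindLang items key "fi"),
       st.2.2.1.or (pvFindLang items key "sv"),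
       st.2.2.2.or (pvFindAny items key)) := by
  induction items generalizing st with
  | nil => simp [pvFindLang, pvFindAny]
  | cons item rest ih =>
    obtain ⟨en, fi, sv, av⟩ := st
    simp only [List.foldl, ih]
    cases hv : pvGet item key with
    | none =>
      simp [pvStep, hv, pvFindLang, pvFindAny, pvTruthy]
    | some v =>
      by_cases he : v = ""
      · simp [pvStep, hv, he, pvFindLang, pvFindAny, pvTruthy]
      · simp only [pvStep, hv, if_neg he, pvFindLang, pvFindAny, pvTruthy,
          decide_eq_true_eq]
        by_cases hen : pvGet item "language" = some "en" <;>
          by_cases hfi : pvGet item "language" = some "fi" <;>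
            by_cases hsv : pvGet item "language" = some "sv" <;>
              cases en <;> cases fi <;> cases sv <;> cases av <;>
                simp_all [Option.or]

-- ===== VERDICT (by name: the statement is the Claim_ definition above) =====
theorem prh_pick_language_spec : Claim_equal_prh_pick_language := by
  intro items key _
  unfold Spec_prh_pick_language prh_pick_language prh_pick_language_alt
  rw [pvFoldl_step]
  cases items with
  | nil => simp [pvFindLang, pvFindAny]
  | cons item rest =>
    simp only [if_neg (by simp : ¬ (item :: rest : List (List (String × String))) = [])]
    cases pvFindLang (item :: rest) key "en" <;>
      cases pvFindLang (item :: rest) key "fi" <;>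
        cases pvFindLang (item :: rest) key "sv" <;>
          simp [Option.or]
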